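-- pv_equiv track=rewrite | github.com/alunas-apex/prompt-optimizer-agent | telegram-bot/handlers.py | _dim_verdict
-- ===== SOURCE A (Python) =====
-- def _dim_verdict(score: int, dim: str) -> str:
--     table: dict[str, list[tuple[int, str]]] = {
--         "clarity":      [(75, "crystal clear"), (50, "a bit vague"),   (25, "too ambiguous"), (0, "very unclear")],
--         "specificity":  [(75, "nicely specific"), (50, "needs more detail"), (25, "too generic"), (0, "very generic")],
--         "structure":    [(75, "well organised"), (50, "could be tidier"), (25, "a bit scattered"), (0, "hard to follow")],
--         "completeness": [(75, "covers the bases"), (50, "missing a few things"), (25, "missing a lot"), (0, "very incomplete")],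
--     }
--     for threshold, label in table.get(dim, [(0, "okay")]):
--         if score >= threshold:
--             return label
--     return "poor"
-- ===== SOURCE B (Python) =====
-- _LABELS = {
--     "clarity":      ["crystal clear", "a bit vague", "too ambiguous", "very unclear"],
--     "specificity":  ["nicely specific", "needs more detail", "too generic", "very generic"],
--     "structure":    ["well organised", "could be tidier", "a bit scattered", "hard to follow"],
--     "completeness": ["covers the bases", "missing a few things", "missing a lot", "very incomplete"],
-- }
--
-- def _dim_verdict(score: int, dim: str) -> str:
--     labels = _LABELS.get(dim)
--     if labels is None:
--         return "okay" if score >= 0 else "poor"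
--     if score < 0:
--         return "poor"
--     return labels[3 - min(score // 25, 3)]
-- ===== Notes on version B (the rewrite author's own statement) =====
-- stated objective: idiomatic
-- what changed: Replaces A's threshold-scanning loop over (threshold,label) pairs with a direct arithmetic index 3 - min(score // 25, 3) into a best-to-worst label list, handling unknown dimensions and negative scores by a sign test.
import Mathlib
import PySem

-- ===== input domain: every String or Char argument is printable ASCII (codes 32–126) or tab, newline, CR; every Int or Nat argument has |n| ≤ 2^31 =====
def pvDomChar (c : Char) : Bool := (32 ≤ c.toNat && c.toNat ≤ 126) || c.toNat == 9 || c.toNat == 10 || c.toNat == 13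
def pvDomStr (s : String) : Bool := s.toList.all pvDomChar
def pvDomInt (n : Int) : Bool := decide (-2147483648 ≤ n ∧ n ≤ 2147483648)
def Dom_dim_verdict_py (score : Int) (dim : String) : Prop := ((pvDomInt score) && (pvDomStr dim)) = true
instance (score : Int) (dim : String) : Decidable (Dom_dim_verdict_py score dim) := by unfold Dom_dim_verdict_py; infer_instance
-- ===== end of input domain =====

-- B replaces A's threshold-scanning loop by a direct arithmetic index into a best-to-worst
-- label list (idiomatic table lookup); return values proved equal on all inputs.

-- ===== PORT A =====
-- the for-loop over (threshold, label) pairs with early return; "poor" when the loop falls through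
def pvAScan (score : Int) : List (Int × String) → String
  | [] => "poor"
  | (threshold, label) :: rest => if score ≥ threshold then label else pvAScan score rest

def dim_verdict_py (score : Int) (dim : String) : String :=
  let table : PySem.Dict String (List (Int × String)) := PySem.Dict.ofList
    [ ("clarity",      [(75, "crystal clear"), (50, "a bit vague"), (25, "too ambiguous"), (0, "very unclear")]),
      ("specificity",  [(75, "nicely specific"), (50, "needs more detail"), (25, "too generic"), (0, "very generic")]),
      ("structure",    [(75, "well organised"), (50, "could be tidier"), (25, "a bit scattered"), (0, "hard to follow")]),
      ("completeness", [(75, "covers the bases"), (50, "missing a few things"), (25, "missing a lot"), (0, "very incomplete")]) ]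
  pvAScan score (PySem.Dict.getD table dim [(0, "okay")])

-- ===== PORT B =====
def pvBLabels : PySem.Dict String (List String) := PySem.Dict.ofList
  [ ("clarity",      ["crystal clear", "a bit vague", "too ambiguous", "very unclear"]),
    ("specificity",  ["nicely specific", "needs more detail", "too generic", "very generic"]),
    ("structure",    ["well organised", "could be tidier", "a bit scattered", "hard to follow"]),
    ("completeness", ["covers the bases", "missing a few things", "missing a lot", "very incomplete"]) ]

def dim_verdict_py_alt (score : Int) (dim : String) : String :=
  match PySem.Dict.get? pvBLabels dim with
  | none => if score ≥ 0 then "okay" else "poor"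
  | some labels =>
    if score < 0 then "poor"
    else
      -- labels[3 - min(score // 25, 3)]: the index is provably in [0,3], so Python's
      -- indexing never raises and List.getD with a dummy default is exact here
      labels.getD (3 - min (PySem.Int.floordiv score 25) 3).toNat ""

-- ===== PRECONDITION & SPEC =====
def Spec_dim_verdict_py (score : Int) (dim : String) (out : String) : Prop := out = dim_verdict_py_alt score dim
instance (score : Int) (dim : String) (out : String) : Decidable (Spec_dim_verdict_py score dim out) := by unfold Spec_dim_verdict_py; infer_instance

-- ===== CLAIM (what is proved, stated in full; the proofs are below) =====
def Claim_equal_dim_verdict_py : Prop := ∀ (score : Int) (dim : String), Dom_dim_verdict_py score dim → Spec_dim_verdict_py score dim (dim_verdict_py score dim)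

-- ===== LEMMAS AND PROOFS =====

-- for any one row of the table, A's scan equals B's arithmetic index
theorem pvScan_eq_index (score : Int) (l0 l1 l2 l3 : String) :
    pvAScan score [(75, l0), (50, l1), (25, l2), (0, l3)] =
      if score < 0 then "poor"
      else [l0, l1, l2, l3].getD (3 - min (PySem.Int.floordiv score 25) 3).toNat "" := by
  have h25 : PySem.Int.floordiv score 25 = score / 25 :=
    PySem.Int.floordiv_eq_ediv_of_pos (by omega)
  rw [h25]
  rcases lt_or_ge score 0 with h | h
  · simp only [pvAScan, ge_iff_le, if_pos h]
    split_ifs <;> first | rfl | omega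
  have hneg : ¬ score < 0 := by omega
  rcases lt_or_ge score 25 with h1 | h1
  · have hdiv : score / 25 = 0 := by omega
    simp only [pvAScan, ge_iff_le, hdiv, if_neg hneg]
    norm_num
    split_ifs <;> first | rfl | omega
  rcases lt_or_ge score 50 with h2 | h2
  · have hdiv : score / 25 = 1 := by omega
    simp only [pvAScan, ge_iff_le, hdiv, if_neg hneg]
    norm_num
    split_ifs <;> first | rfl | omega
  rcases lt_or_ge score 75 with h3 | h3
  · have hdiv : score / 25 = 2 := by omega
    simp only [pvAScan, ge_iff_le, hdiv, if_neg hneg]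
    norm_num
    split_ifs <;> first | rfl | omega
  · have hmin : min (score / 25) 3 = 3 := by omega
    simp only [pvAScan, ge_iff_le, hmin, if_neg hneg]
    norm_num
    split_ifs <;> first | rfl | omega

-- evaluating the two closed dict lookups for each known key (definitional)
theorem pvA_clarity (score : Int) : dim_verdict_py score "clarity" =
    pvAScan score [(75, "crystal clear"), (50, "a bit vague"), (25, "too ambiguous"), (0, "very unclear")] := rfl
theorem pvB_clarity (score : Int) : dim_verdict_py_alt score "clarity" =
    (if score < 0 then "poor" else ["crystal clear", "a bit vague", "too ambiguous", "very unclear"].getD (3 - min (PySem.Int.floordiv score 25) 3).toNat "") := rfl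
theorem pvA_specificity (score : Int) : dim_verdict_py score "specificity" =
    pvAScan score [(75, "nicely specific"), (50, "needs more detail"), (25, "too generic"), (0, "very generic")] := rfl
theorem pvB_specificity (score : Int) : dim_verdict_py_alt score "specificity" =
    (if score < 0 then "poor" else ["nicely specific", "needs more detail", "too generic", "very generic"].getD (3 - min (PySem.Int.floordiv score 25) 3).toNat "") := rfl
theorem pvA_structure (score : Int) : dim_verdict_py score "structure" =
    pvAScan score [(75, "well organised"), (50, "could be tidier"), (25, "a bit scattered"), (0, "hard to follow")] := rfl
theorem pvB_structure (score : Int) : dim_verdict_py_alt score "structure" =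
    (if score < 0 then "poor" else ["well organised", "could be tidier", "a bit scattered", "hard to follow"].getD (3 - min (PySem.Int.floordiv score 25) 3).toNat "") := rfl
theorem pvA_completeness (score : Int) : dim_verdict_py score "completeness" =
    pvAScan score [(75, "covers the bases"), (50, "missing a few things"), (25, "missing a lot"), (0, "very incomplete")] := rfl
theorem pvB_completeness (score : Int) : dim_verdict_py_alt score "completeness" =
    (if score < 0 then "poor" else ["covers the bases", "missing a few things", "missing a lot", "very incomplete"].getD (3 - min (PySem.Int.floordiv score 25) 3).toNat "") := rfl

-- ===== VERDICT (by name: the statement is the Claim_ definition above) =====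
theorem dim_verdict_py_spec : Claim_equal_dim_verdict_py := by
  intro score dim _
  unfold Spec_dim_verdict_py
  by_cases h1 : dim = "clarity"
  · subst h1; rw [pvA_clarity, pvB_clarity, pvScan_eq_index]
  by_cases h2 : dim = "specificity"
  · subst h2; rw [pvA_specificity, pvB_specificity, pvScan_eq_index]
  by_cases h3 : dim = "structure"
  · subst h3; rw [pvA_structure, pvB_structure, pvScan_eq_index]
  by_cases h4 : dim = "completeness"
  · subst h4; rw [pvA_completeness, pvB_completeness, pvScan_eq_index]
  · -- unknown dimension: both lookups miss, A scans [(0, "okay")], B branches on the sign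
    have e1 : ("clarity" == dim) = false := by simp [Ne.symm h1]
    have e2 : ("specificity" == dim) = false := by simp [Ne.symm h2]
    have e3 : ("structure" == dim) = false := by simp [Ne.symm h3]
    have e4 : ("completeness" == dim) = false := by simp [Ne.symm h4]
    unfold dim_verdict_py dim_verdict_py_alt
    simp [PySem.Dict.getD, PySem.Dict.get?,
      show (PySem.Dict.ofList
        [ ("clarity",      [((75:Int), "crystal clear"), (50, "a bit vague"), (25, "too ambiguous"), (0, "very unclear")]),
          ("specificity",  [(75, "nicely specific"), (50, "needs more detail"), (25, "too generic"), (0, "very generic")]),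
          ("structure",    [(75, "well organised"), (50, "could be tidier"), (25, "a bit scattered"), (0, "hard to follow")]),
          ("completeness", [(75, "covers the bases"), (50, "missing a few things"), (25, "missing a lot"), (0, "very incomplete")]) ]).items =
        [ ("clarity",      [((75:Int), "crystal clear"), (50, "a bit vague"), (25, "too ambiguous"), (0, "very unclear")]),
          ("specificity",  [(75, "nicely specific"), (50, "needs more detail"), (25, "too generic"), (0, "very generic")]),
          ("structure",    [(75, "well organised"), (50, "could be tidier"), (25, "a bit scattered"), (0, "hard to follow")]),
          ("completeness", [(75, "covers the bases"), (50, "missing a few things"), (25, "missing a lot"), (0, "very incomplete")]) ] from rfl,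
      show pvBLabels.items =
        [ ("clarity",      ["crystal clear", "a bit vague", "too ambiguous", "very unclear"]),
          ("specificity",  ["nicely specific", "needs more detail", "too generic", "very generic"]),
          ("structure",    ["well organised", "could be tidier", "a bit scattered", "hard to follow"]),
          ("completeness", ["covers the bases", "missing a few things", "missing a lot", "very incomplete"]) ] from rfl,
      List.find?, e1, e2, e3, e4, pvAScan]
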